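-- pv_equiv track=rewrite | github.com/burrows99/Miscellaneous | dijkstra's algorthim.py | repeating
-- ===== SOURCE A (Python) =====
-- graph=[[0,2,4,0,0,0],
--        [0,0,1,7,0,0],
--        [0,0,0,0,3,0],
--        [0,0,0,0,0,1],
--        [0,0,0,2,0,5],
--        [0,0,0,0,0,0]]
--
-- inf=9999999999999
--
-- def repeating(graph,node,d,n):
--     if(n==0):
--         return(d)
--     else:
--         minDistance=inf
--         for distance in graph[node]:
--             if(distance!=0):
--                 minDistance=min(minDistance,distance)
--         nextNode=graph[node].index(minDistance)
--         d[nextNode]=min(d[nextNode],graph[node][nextNode]+d[node])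
--         return(repeating(graph,nextNode,d,n-1))
-- ===== SOURCE B (Python) =====
-- def repeating(graph, node, d, n):
--     # Iterative rewrite of the recursive greedy walk; mutates d in place like the original.
--     for _ in range(n):
--         row = graph[node]
--         m = min(x for x in row if x != 0)
--         nxt = row.index(m)
--         d[nxt] = min(d[nxt], row[nxt] + d[node])
--         node = nxt
--     return d
-- ===== Notes on version B (the rewrite author's own statement) =====
-- stated objective: idiomatic
-- what changed: The tail recursion (one Python frame per step, a foldl-with-sentinel minimum re-reading graph[node]) is rewritten as a plain iterative for-loop that binds the row once and takes min over the filtered nonzero entries.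
-- outside the precondition, e.g. on repeating([[0, 1], [1, 0]], 0, [0, 0], 980): A returns [0, 0], B returns [0, 0]
import Mathlib
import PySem

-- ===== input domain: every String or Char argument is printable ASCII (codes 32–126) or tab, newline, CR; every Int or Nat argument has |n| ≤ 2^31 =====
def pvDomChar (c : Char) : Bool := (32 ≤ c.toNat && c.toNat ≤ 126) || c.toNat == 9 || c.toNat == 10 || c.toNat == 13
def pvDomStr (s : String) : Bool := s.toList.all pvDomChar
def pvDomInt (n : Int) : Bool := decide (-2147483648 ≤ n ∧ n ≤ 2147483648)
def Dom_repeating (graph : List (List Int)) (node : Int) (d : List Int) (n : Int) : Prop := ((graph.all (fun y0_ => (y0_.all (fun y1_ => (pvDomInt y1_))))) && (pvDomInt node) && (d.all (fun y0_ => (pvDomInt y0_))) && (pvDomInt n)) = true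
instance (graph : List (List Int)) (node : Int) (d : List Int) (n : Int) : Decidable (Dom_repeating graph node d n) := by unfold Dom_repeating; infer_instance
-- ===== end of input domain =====

-- B replaces A's tail recursion by an iterative loop over range(n); both A and B mutate the
-- caller's list d in place in Python; the equivalence proved here is about the returned value.

-- ===== PORT A =====
-- A's recursion, fueled by n.toNat (for n < 0 Python A returns d at its n==0 test? no: it
-- recurses forever; Pre_ excludes n < 0). Where Python raises (IndexError on graph[node]/d[...],
-- ValueError on .index) the port returns the current d; Pre_ excludes those inputs.
def repeatingAux (graph : List (List Int)) (node : Int) (d : List Int) : Nat → List Int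
  | 0 => d
  | Nat.succ k =>
    let row := (PySem.List.pyGet? graph node).getD []
    let minDistance := row.foldl (fun m x => if x ≠ 0 then min m x else m) 9999999999999
    match PySem.List.index? row minDistance with
    | none => d
    | some nextNode =>
      let d' := PySem.List.pySetD d (nextNode : Int)
        (min (PySem.List.pyGetD d (nextNode : Int) 0)
             (PySem.List.pyGetD row (nextNode : Int) 0 + PySem.List.pyGetD d node 0))
      repeatingAux graph (nextNode : Int) d' k

def repeating (graph : List (List Int)) (node : Int) (d : List Int) (n : Int) : List Int :=
  if n == 0 then d else repeatingAux graph node d n.toNat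

-- ===== PORT B =====
-- B's loop body: bind the row once, min over the filtered nonzero entries, update, advance.
-- The Int argument is the (ignored) range counter.
def bstep (graph : List (List Int)) (st : Int × List Int) (_ : Int) : Int × List Int :=
  let node := st.1
  let d := st.2
  let row := (PySem.List.pyGet? graph node).getD []
  match PySem.List.min? (row.filter (fun x => x ≠ 0)) (fun x => x) with
  | none => st
  | some m =>
    match PySem.List.index? row m with
    | none => st
    | some nxt =>
      ((nxt : Int), PySem.List.pySetD d (nxt : Int)
        (min (PySem.List.pyGetD d (nxt : Int) 0)
             (PySem.List.pyGetD row (nxt : Int) 0 + PySem.List.pyGetD d node 0)))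

def repeating_alt (graph : List (List Int)) (node : Int) (d : List Int) (n : Int) : List Int :=
  ((PySem.List.pyRange 0 n 1).foldl (bstep graph) (node, d)).2

-- ===== PRECONDITION & SPEC =====
-- Where the walk goes next depends only on the graph (the index of the minimum nonzero entry
-- of the current row), never on d's values, so the set of rows A visits is the successor-orbit
-- of the start node. nextOf is that successor, none exactly where one Python step raises:
-- graph[node] out of range (IndexError), an all-zero row (.index(inf) ValueError), or a
-- d-index out of range (IndexError).
def nextOf (graph : List (List Int)) (d : List Int) (v : Int) : Option Int :=
  match PySem.List.pyGet? graph v with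
  | none => none
  | some row =>
    match row.filter (fun x => x ≠ 0) with
    | [] => none
    | y :: t =>
      match PySem.List.index? row (t.foldl min y) with
      | none => none
      | some nxt =>
        if (PySem.List.pyGet? d (nxt : Int)).isSome ∧ (PySem.List.pyGet? d v).isSome
        then some (nxt : Int) else none

def walkOK (graph : List (List Int)) (d : List Int) (v : Int) : Nat → Bool
  | 0 => true
  | Nat.succ k =>
    match nextOf graph d v with
    | none => false
    | some w => walkOK graph d w k

-- Pre_ excludes exactly the inputs on which Python A raises: n < 0 (unbounded recursion),
-- n > 950 (RecursionError: one frame per step against CPython's ~1000-frame default limit,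
-- which A hits near n ≈ 996; the bound is slightly conservative because the exact threshold
-- depends on the interpreter's prior stack depth — see the cited example), and walks that hit
-- a raising step. Checking min(n, graph.length+2) successor steps is exact: after
-- graph.length+2 successful steps the deterministic successor has revisited a node, so the
-- walk cycles and every later step succeeds too.
def Pre_repeating (graph : List (List Int)) (node : Int) (d : List Int) (n : Int) : Prop :=
  n = 0 ∨ (1 ≤ n ∧ n ≤ 950 ∧ walkOK graph d node (min n.toNat (graph.length + 2)) = true)

instance (graph : List (List Int)) (node : Int) (d : List Int) (n : Int) : Decidable (Pre_repeating graph node d n) := by unfold Pre_repeating; infer_instance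

def pvWitness_repeating : List (List Int) × Int × List Int × Int :=
  ([[0, 2, 1], [0, 0, 3], [4, 0, 0]], 0, [0, 10, 10], 3)

def Spec_repeating (graph : List (List Int)) (node : Int) (d : List Int) (n : Int) (out : List Int) : Prop := out = repeating_alt graph node d n
instance (graph : List (List Int)) (node : Int) (d : List Int) (n : Int) (out : List Int) : Decidable (Spec_repeating graph node d n out) := by unfold Spec_repeating; infer_instance

-- ===== CLAIM (what is proved, stated in full; the proofs are below) =====
def Claim_equal_repeating : Prop := ∀ (graph : List (List Int)) (node : Int) (d : List Int) (n : Int), Dom_repeating graph node d n → Pre_repeating graph node d n → Spec_repeating graph node d n (repeating graph node d n)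


-- ===== LEMMAS AND PROOFS =====

-- B's fold ignores the range elements: it is k-fold iteration of the step.
def iterB (graph : List (List Int)) : Nat → (Int × List Int) → (Int × List Int)
  | 0, st => st
  | Nat.succ k, st => iterB graph k (bstep graph st 0)

lemma foldl_bstep_eq_iterB (graph : List (List Int)) (l : List Int) (st : Int × List Int) :
    l.foldl (bstep graph) st = iterB graph l.length st := by
  induction l generalizing st with
  | nil => rfl
  | cons x t ih =>
    simp only [List.foldl_cons, List.length_cons, iterB]
    exact ih _

lemma iterB_fixed (graph : List (List Int)) (st : Int × List Int)
    (h : bstep graph st 0 = st) : ∀ k, iterB graph k st = st := by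
  intro k
  induction k with
  | zero => rfl
  | succ k ih => simp [iterB, h, ih]

-- A's sentinel fold equals the min-fold over the nonzero entries.
lemma foldl_if_eq_filter (l : List Int) (a : Int) :
    l.foldl (fun m x => if x ≠ 0 then min m x else m) a
      = (l.filter (fun x => x ≠ 0)).foldl min a := by
  induction l generalizing a with
  | nil => rfl
  | cons x t ih =>
    rw [List.foldl_cons, List.filter_cons]
    by_cases hx : x = 0
    · rw [if_neg (by simp [hx]), if_neg (by simp [hx]), ih]
    · rw [if_pos (by simp [hx]), if_pos (by simp [hx]), List.foldl_cons, ih]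

-- the one real fact: starting the min-fold from a value above the head changes nothing
lemma foldl_min_of_head_le (t : List Int) (x a : Int) (hx : x ≤ a) :
    t.foldl min (min a x) = t.foldl min x := by
  have : min a x = x := min_eq_right hx
  rw [this]

-- One step of A agrees with one step of B (on bounded rows), or both sides stall:
-- either A's index? fails and B's step is the identity, or both produce the same next state.
lemma step_cases (graph : List (List Int)) (node : Int) (d : List Int)
    (hb : ∀ row ∈ graph, ∀ x ∈ row, x ≤ 2147483648) :
    (let row := (PySem.List.pyGet? graph node).getD []
     let minDistance := row.foldl (fun m x => if x ≠ 0 then min m x else m) 9999999999999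
     PySem.List.index? row minDistance = none ∧ bstep graph (node, d) 0 = (node, d))
    ∨ (∃ row nextNode,
        row = (PySem.List.pyGet? graph node).getD [] ∧
        PySem.List.index? row (row.foldl (fun m x => if x ≠ 0 then min m x else m) 9999999999999) = some nextNode ∧
        bstep graph (node, d) 0 =
          ((nextNode : Int), PySem.List.pySetD d (nextNode : Int)
            (min (PySem.List.pyGetD d (nextNode : Int) 0)
                 (PySem.List.pyGetD row (nextNode : Int) 0 + PySem.List.pyGetD d node 0)))) := by
  set row := (PySem.List.pyGet? graph node).getD [] with hrow
  have hrow_mem : ∀ x ∈ row, x ≤ 2147483648 := by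
    intro x hx
    rcases h : PySem.List.pyGet? graph node with _ | r
    · rw [hrow, h] at hx; simp at hx
    · have : r ∈ graph := PySem.List.mem_of_pyGet?_eq_some _ h
      rw [hrow, h] at hx
      exact hb r this x hx
  rcases hfil : row.filter (fun x => x ≠ 0) with _ | ⟨y, t⟩
  · -- empty filter: A's fold is the sentinel, which is not in the (bounded) row
    left
    have hmd : row.foldl (fun m x => if x ≠ 0 then min m x else m) 9999999999999
        = (9999999999999 : Int) := by rw [foldl_if_eq_filter, hfil]; rfl
    have hnotmem : (9999999999999 : Int) ∉ row := by
      intro hmem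
      have := hrow_mem _ hmem
      omega
    constructor
    · rw [hmd]
      exact (PySem.List.index?_eq_none_iff row _).mpr hnotmem
    · show bstep graph (node, d) 0 = (node, d)
      simp only [bstep, ← hrow, hfil]
      rfl
  · -- nonempty filter: both compute min of the nonzero entries
    right
    have hy_le : y ≤ 2147483648 := by
      have : y ∈ row.filter (fun x => x ≠ 0) := by rw [hfil]; exact List.mem_cons_self
      exact hrow_mem y (List.mem_of_mem_filter this)
    have hmd : row.foldl (fun m x => if x ≠ 0 then min m x else m) 9999999999999
        = t.foldl min y := by
      rw [foldl_if_eq_filter, hfil, List.foldl_cons]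
      exact foldl_min_of_head_le t y 9999999999999 (by omega)
    have hmin : PySem.List.min? (row.filter (fun x => x ≠ 0)) (fun x => x)
        = some (t.foldl min y) := by rw [hfil]; exact PySem.List.min?_id_cons y t
    have hmem : t.foldl min y ∈ row :=
      List.mem_of_mem_filter (PySem.List.min?_mem hmin)
    obtain ⟨nxt, hnxt⟩ : ∃ k, PySem.List.index? row (t.foldl min y) = some k := by
      rcases h : PySem.List.index? row (t.foldl min y) with _ | k
      · exact absurd hmem ((PySem.List.index?_eq_none_iff row (t.foldl min y)).mp h)
      · exact ⟨k, rfl⟩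
    refine ⟨row, nxt, rfl, by rw [hmd]; exact hnxt, ?_⟩
    simp only [bstep, ← hrow, hmin, hnxt]

-- Main invariant: A's fueled recursion equals k iterations of B's step.
lemma aux_eq_iterB (graph : List (List Int))
    (hb : ∀ row ∈ graph, ∀ x ∈ row, x ≤ 2147483648) :
    ∀ (k : Nat) (node : Int) (d : List Int),
      repeatingAux graph node d k = (iterB graph k (node, d)).2 := by
  intro k
  induction k with
  | zero => intro node d; rfl
  | succ k ih =>
    intro node d
    rcases step_cases graph node d hb with ⟨hnone, hfix⟩ | ⟨row, nxt, hrow, hsome, hstep⟩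
    · -- A returns d; B's step is the identity, so the remaining iterations keep d
      have : repeatingAux graph node d (k + 1) = d := by
        simp only [repeatingAux]
        rw [hnone]
      rw [this]
      show d = (iterB graph (k + 1) (node, d)).2
      have : iterB graph (k + 1) (node, d) = (node, d) := iterB_fixed graph (node, d) hfix (k + 1)
      rw [this]
    · have hA : repeatingAux graph node d (k + 1) =
          repeatingAux graph (nxt : Int)
            (PySem.List.pySetD d (nxt : Int)
              (min (PySem.List.pyGetD d (nxt : Int) 0)
                   (PySem.List.pyGetD row (nxt : Int) 0 + PySem.List.pyGetD d node 0))) k := by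
        simp only [repeatingAux]
        rw [← hrow, hsome]
      rw [hA, ih]
      show _ = (iterB graph k (bstep graph (node, d) 0)).2
      rw [hstep]

-- ===== VERDICT (by name: the statement is the Claim_ definition above) =====
theorem repeating_spec : Claim_equal_repeating := by
  intro graph node d n hdom hpre
  unfold Spec_repeating repeating repeating_alt
  have hb : ∀ row ∈ graph, ∀ x ∈ row, x ≤ 2147483648 := by
    unfold Dom_repeating at hdom
    simp only [Bool.and_eq_true, List.all_eq_true] at hdom
    intro row hrow x hx
    have := hdom.1.1.1 row hrow x hx
    unfold pvDomInt at this
    simp at this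
    omega
  by_cases h : n = 0
  · subst h
    simp [PySem.List.pyRange_one_eq_nil]
  · have hn0 : 0 ≤ n := by
      rcases hpre with h0 | ⟨h1, _, _⟩
      · exact absurd h0 h
      · omega
    have hne : (n == 0) = false := by simpa using h
    rw [hne]
    simp only [Bool.false_eq_true, if_false]
    rw [foldl_bstep_eq_iterB, PySem.List.length_pyRange_one]
    have : (n - 0).toNat = n.toNat := by omega
    rw [this]
    exact aux_eq_iterB graph hb n.toNat node d
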